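-- pv_equiv track=rewrite | github.com/ThePfarrer/Data-Structures---Algos | ch 08/missing_letter.py | missing_letter
-- ===== SOURCE A (Python) =====
-- def missing_letter(sentence):
--     sentence = "".join(sentence.split(" "))
--
--     letters = "abcdefghijklmnopqrstuvwxyz"
--
--     hash_map = {}
--
--     for ch in sentence:
--         hash_map[ch] = True
--
--     for ch in letters:
--         if ch not in hash_map:
--             return ch
-- ===== SOURCE B (Python) =====
-- def missing_letter(sentence):
--     # Bitmask of present lowercase letters, built in one pass; the answer is the
--     # lowest zero bit of the mask, extracted by bit arithmetic (no alphabet scan).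
--     mask = 0
--     for ch in sentence:
--         o = ord(ch) - 97
--         if 0 <= o < 26:
--             mask |= 1 << o
--     if mask == (1 << 26) - 1:
--         return None
--     return chr(97 + (mask ^ (mask + 1)).bit_length() - 1)
-- ===== Notes on version B (the rewrite author's own statement) =====
-- stated objective: alternative
-- what changed: B replaces A's strip-spaces + presence-dict build + alphabet scan with a single pass that ORs each lowercase letter into a 26-bit mask and then computes the first missing letter arithmetically as the lowest zero bit of the mask (via xor with mask+1 and bit_length), with no dictionary and no scan over the alphabet.
import Mathlib
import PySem

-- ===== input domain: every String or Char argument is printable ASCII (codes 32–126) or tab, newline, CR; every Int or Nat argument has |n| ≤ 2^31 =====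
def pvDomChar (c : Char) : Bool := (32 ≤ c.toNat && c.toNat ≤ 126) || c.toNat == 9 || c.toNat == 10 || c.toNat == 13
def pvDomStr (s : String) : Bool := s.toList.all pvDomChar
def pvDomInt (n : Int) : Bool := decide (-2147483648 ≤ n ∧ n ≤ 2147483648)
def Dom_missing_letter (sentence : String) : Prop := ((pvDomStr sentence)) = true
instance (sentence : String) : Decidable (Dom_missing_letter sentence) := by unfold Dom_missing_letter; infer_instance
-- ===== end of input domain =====

-- B replaces A's strip-spaces + presence-dict + alphabet-scan pipeline by a single pass
-- that ORs each lowercase letter into a 26-bit mask and extracts the lowest zero bit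
-- arithmetically (xor with mask+1, then bit length) — an alternative algorithm, same cost.

-- ===== PORT A =====
-- the second loop of A: for ch in letters: if ch not in hash_map: return ch
def missingLoopA (letters : List Char) (hm : PySem.Dict Char Bool) : Option String :=
  match letters with
  | [] => none
  | ch :: rest =>
      if hm.contains ch = false then some (String.ofList [ch]) else missingLoopA rest hm

def missing_letter (sentence : String) : Option String :=
  -- sentence = "".join(sentence.split(" "))
  let s : List Char := PySem.Chars.join [] (PySem.Chars.splitOn sentence.toList [' '])
  let letters : List Char := "abcdefghijklmnopqrstuvwxyz".toList
  -- for ch in sentence: hash_map[ch] = True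
  let hm : PySem.Dict Char Bool := s.foldl (fun d ch => d.insert ch true) PySem.Dict.empty
  missingLoopA letters hm

-- ===== PORT B =====
-- n.bit_length() for n : Nat
def bitLength (n : Nat) : Nat := if n = 0 then 0 else Nat.log2 n + 1

-- one step of B's loop: o = ord(ch) - 97; if 0 <= o < 26: mask |= 1 << o
def maskStep (m : Nat) (ch : Char) : Nat :=
  let o : Int := (ch.toNat : Int) - 97
  if 0 ≤ o ∧ o < 26 then m ||| (1 <<< o.toNat) else m

def missing_letter_alt (sentence : String) : Option String :=
  let mask : Nat := sentence.toList.foldl maskStep 0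
  if mask = (1 <<< 26) - 1 then none
  else some (String.ofList [Char.ofNat (97 + bitLength (mask ^^^ (mask + 1)) - 1)])

-- ===== PRECONDITION & SPEC =====
def Spec_missing_letter (sentence : String) (out : Option String) : Prop := out = missing_letter_alt sentence
instance (sentence : String) (out : Option String) : Decidable (Spec_missing_letter sentence out) := by unfold Spec_missing_letter; infer_instance

-- ===== CLAIM (what is proved, stated in full; the proofs are below) =====
def Claim_equal_missing_letter : Prop := ∀ (sentence : String), Dom_missing_letter sentence → Spec_missing_letter sentence (missing_letter sentence)

-- ===== LEMMAS AND PROOFS =====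

-- ---- A-side: "".join of split(" ") just removes the spaces ----
lemma splitOn_go_flatten (fuel : Nat) (l cur : List Char) (acc : List (List Char)) (h : l.length ≤ fuel) :
    (PySem.Chars.splitOn.go [' '] fuel l cur acc).flatten
      = acc.reverse.flatten ++ cur.reverse ++ l.filter (fun c => c ≠ ' ') := by
  induction fuel generalizing l cur acc with
  | zero =>
      interval_cases hl : l.length
      have : l = [] := List.length_eq_zero_iff.mp hl
      subst this
      simp [PySem.Chars.splitOn.go]
  | succ n ih =>
      cases l with
      | nil => simp [PySem.Chars.splitOn.go]
      | cons c rest =>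
          by_cases hc : c = ' '
          · subst hc
            rw [show PySem.Chars.splitOn.go [' '] (n+1) (' ' :: rest) cur acc
                  = PySem.Chars.splitOn.go [' '] n rest [] (cur.reverse :: acc) from by
                simp [PySem.Chars.splitOn.go, List.isPrefixOf]]
            rw [ih rest [] (cur.reverse :: acc) (by simpa using Nat.lt_succ_iff.mp (by simpa using h))]
            simp
          · rw [show PySem.Chars.splitOn.go [' '] (n+1) (c :: rest) cur acc
                  = PySem.Chars.splitOn.go [' '] n rest (c :: cur) acc from by
                have hne : ([' '].isPrefixOf (c :: rest)) = false := by
                  simp [List.isPrefixOf, Ne.symm hc]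
                simp [PySem.Chars.splitOn.go, hne]]
            rw [ih rest (c :: cur) acc (by simpa using Nat.lt_succ_iff.mp (by simpa using h))]
            simp [hc]

lemma join_nil_eq_flatten (parts : List (List Char)) :
    PySem.Chars.join [] parts = parts.flatten := by
  induction parts with
  | nil => rfl
  | cons p ps ih =>
      cases ps with
      | nil => simp [PySem.Chars.join, List.intercalate]
      | cons q qs =>
          simp only [PySem.Chars.join, List.intercalate] at *
          simp_all [List.intersperse]

lemma join_splitOn_space (t : List Char) :
    PySem.Chars.join [] (PySem.Chars.splitOn t [' ']) = t.filter (fun c => c ≠ ' ') := by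
  rw [join_nil_eq_flatten, PySem.Chars.splitOn,
      splitOn_go_flatten (t.length + 1) t [] [] (Nat.le_succ _)]
  simp

lemma contains_foldl_insert (l : List Char) (d : PySem.Dict Char Bool) (ch : Char) :
    (l.foldl (fun d ch => d.insert ch true) d).contains ch = (d.contains ch || decide (ch ∈ l)) := by
  induction l generalizing d with
  | nil => simp
  | cons c rest ih =>
      simp only [List.foldl_cons, ih, PySem.Dict.contains_insert, List.mem_cons]
      by_cases h : ch = c <;> by_cases h2 : ch ∈ rest <;> simp [h, h2]

-- ---- Char facts ----
lemma char_toNat_inj {a b : Char} (h : a.toNat = b.toNat) : a = b := by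
  cases a; cases b; simpa [Char.toNat, UInt32.toNat_inj] using h

def chOf (i : Nat) : Char := Char.ofNat (97 + i)

lemma chOf_toNat {i : Nat} (h : i < 26) : (chOf i).toNat = 97 + i := by
  rw [chOf, Char.toNat_ofNat, if_pos]
  exact Or.inl (by omega)

-- ---- B-side: bits of the mask ----
lemma testBit_maskStep (m : Nat) (c : Char) (i : Nat) :
    (maskStep m c).testBit i = (m.testBit i || decide (i < 26 ∧ c.toNat = 97 + i)) := by
  simp only [maskStep]
  split
  · rename_i h
    rw [Nat.one_shiftLeft, Nat.testBit_lor, Nat.testBit_two_pow]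
    congr 1
    rw [decide_eq_decide]
    omega
  · rename_i h
    have : ¬ (i < 26 ∧ c.toNat = 97 + i) := by
      intro ⟨h1, h2⟩; exact h ⟨by omega, by omega⟩
    simp [this]

lemma testBit_foldl_mask (l : List Char) (m i : Nat) :
    (l.foldl maskStep m).testBit i
      = (m.testBit i || decide (i < 26 ∧ ∃ c ∈ l, c.toNat = 97 + i)) := by
  induction l generalizing m with
  | nil => simp
  | cons c rest ih =>
      rw [List.foldl_cons, ih, testBit_maskStep, Bool.or_assoc]
      congr 1
      rw [Bool.eq_iff_iff]
      simp only [Bool.or_eq_true, decide_eq_true_eq]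
      constructor
      · rintro (⟨h1, h2⟩ | ⟨h1, c', hc', h2⟩)
        · exact ⟨h1, c, List.mem_cons_self, h2⟩
        · exact ⟨h1, c', List.mem_cons_of_mem _ hc', h2⟩
      · rintro ⟨h1, c', hc', h2⟩
        rcases List.mem_cons.mp hc' with rfl | hc'
        · exact Or.inl ⟨h1, h2⟩
        · exact Or.inr ⟨h1, c', hc', h2⟩

-- ---- least zero bit ----
def leastZero (n : Nat) : Nat :=
  if h : n % 2 = 1 then leastZero (n / 2) + 1 else 0
decreasing_by exact Nat.div_lt_self (by omega) (by omega)

lemma leastZero_testBit (n : Nat) :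
    n.testBit (leastZero n) = false ∧ ∀ j < leastZero n, n.testBit j = true := by
  induction n using Nat.strong_induction_on with
  | _ n ih =>
    rw [leastZero]
    split
    · rename_i h
      obtain ⟨h1, h2⟩ := ih (n / 2) (Nat.div_lt_self (by omega) (by omega))
      refine ⟨by simpa [Nat.testBit_succ] using h1, ?_⟩
      intro j hj
      cases j with
      | zero => simp [Nat.testBit_zero, h]
      | succ j => simpa [Nat.testBit_succ] using h2 j (by omega)
    · rename_i h
      exact ⟨by simp [Nat.testBit_zero]; omega, by omega⟩

lemma xor_succ_eq (n : Nat) : n ^^^ (n + 1) = 2 ^ (leastZero n + 1) - 1 := by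
  induction n using Nat.strong_induction_on with
  | _ n ih =>
    rw [leastZero]
    split
    · rename_i h
      have hlt : n / 2 < n := Nat.div_lt_self (by omega) (by omega)
      have hrec := ih (n / 2) hlt
      have hdiv : (n ^^^ (n + 1)) / 2 = n / 2 ^^^ (n + 1) / 2 := Nat.xor_div_two
      have hsucc : (n + 1) / 2 = n / 2 + 1 := by omega
      have hmod : (n ^^^ (n + 1)) % 2 = 1 := by
        rw [Nat.xor_mod_two_eq_one]; omega
      have hpow : 2 ^ (leastZero (n / 2) + 1 + 1) = 2 * 2 ^ (leastZero (n / 2) + 1) := by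
        rw [Nat.pow_succ]; ring
      have hp : 0 < 2 ^ (leastZero (n / 2) + 1) := pow_pos (by omega : (0:Nat) < 2) _
      rw [hsucc, hrec] at hdiv
      omega
    · rename_i h
      have hdiv : (n ^^^ (n + 1)) / 2 = n / 2 ^^^ (n + 1) / 2 := Nat.xor_div_two
      have hsucc : (n + 1) / 2 = n / 2 := by omega
      have hmod : (n ^^^ (n + 1)) % 2 = 1 := by
        rw [Nat.xor_mod_two_eq_one]; omega
      rw [hsucc, Nat.xor_self] at hdiv
      omega

lemma log2_two_pow_sub_one (k : Nat) : Nat.log2 (2 ^ (k + 1) - 1) = k := by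
  have h1 : 2 ^ k ≤ 2 ^ (k + 1) - 1 := by
    have : 2 ^ (k + 1) = 2 * 2 ^ k := by rw [Nat.pow_succ]; ring
    have hp : 0 < 2 ^ k := pow_pos (by omega : (0:Nat) < 2) _
    omega
  have hne : 2 ^ (k + 1) - 1 ≠ 0 := by
    have hp : 0 < 2 ^ k := pow_pos (by omega : (0:Nat) < 2) _
    omega
  exact (Nat.log2_eq_iff hne).mpr ⟨h1, by omega⟩

-- ---- A's scan over the alphabet, located at the first absent letter ----
lemma loopA_none (L : List Char) (hm : PySem.Dict Char Bool)
    (h : ∀ ch ∈ L, hm.contains ch = true) : missingLoopA L hm = none := by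
  induction L with
  | nil => rfl
  | cons c rest ih =>
      rw [missingLoopA, if_neg (by simp [h c List.mem_cons_self])]
      exact ih fun ch hch => h ch (List.mem_cons_of_mem _ hch)

lemma loopA_range' (cnt : Nat) : ∀ (s k : Nat) (hm : PySem.Dict Char Bool),
    (∀ j < k, hm.contains (chOf j) = true) → hm.contains (chOf k) = false →
    s ≤ k → k < s + cnt →
    missingLoopA ((List.range' s cnt).map chOf) hm = some (String.ofList [chOf k]) := by
  induction cnt with
  | zero => intro s k hm _ _ h1 h2; omega
  | succ n ih =>
      intro s k hm hall hk h1 h2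
      rw [List.range'_succ, List.map_cons, missingLoopA]
      by_cases hs : s = k
      · subst hs; rw [if_pos (by simp [hk])]
      · rw [if_neg (by simp [hall s (by omega)])]
        exact ih (s + 1) k hm hall hk (by omega) (by omega)

lemma alphabet_eq : "abcdefghijklmnopqrstuvwxyz".toList = (List.range' 0 26).map chOf := by
  decide

-- ===== VERDICT (by name: the statement is the Claim_ definition above) =====
theorem missing_letter_spec : Claim_equal_missing_letter := by
  intro sentence _
  unfold Spec_missing_letter missing_letter missing_letter_alt
  simp only [join_splitOn_space]
  set t : List Char := sentence.toList with ht
  set mask : Nat := t.foldl maskStep 0 with hmask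
  set hm : PySem.Dict Char Bool :=
    (t.filter (fun c => c ≠ ' ')).foldl (fun d ch => d.insert ch true) PySem.Dict.empty with hhm
  -- the dict's membership at letter i is exactly bit i of the mask
  have hbit : ∀ i, mask.testBit i = decide (i < 26 ∧ ∃ c ∈ t, c.toNat = 97 + i) := by
    intro i
    rw [hmask, testBit_foldl_mask]
    simp
  have hcont : ∀ i < 26, hm.contains (chOf i) = mask.testBit i := by
    intro i hi
    rw [hhm, contains_foldl_insert, hbit i]
    have : PySem.Dict.contains (PySem.Dict.empty : PySem.Dict Char Bool) (chOf i) = false := by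
      rfl
    rw [this, Bool.false_or, decide_eq_decide]
    constructor
    · intro hmem
      obtain ⟨hmem', -⟩ := List.mem_filter.mp hmem
      exact ⟨hi, chOf i, hmem', chOf_toNat hi⟩
    · rintro ⟨-, c, hc, hcn⟩
      have hceq : c = chOf i := char_toNat_inj (by rw [hcn, chOf_toNat hi])
      subst hceq
      refine List.mem_filter.mpr ⟨hc, ?_⟩
      have := chOf_toNat hi
      simp only [decide_eq_true_eq]
      intro hsp
      rw [hsp] at this
      simp [Char.toNat] at this
      omega
  have hhigh : ∀ j, 26 ≤ j → mask.testBit j = false := by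
    intro j hj
    rw [hbit j]
    simp
    omega
  rw [Nat.one_shiftLeft]
  by_cases hfull : mask = 2 ^ 26 - 1
  · rw [if_pos hfull]
    rw [alphabet_eq]
    apply loopA_none
    intro ch hch
    obtain ⟨i, hi, rfl⟩ := List.mem_map.mp hch
    have hi26 : i < 26 := by
      have := List.mem_range'_1.mp hi
      omega
    rw [hcont i hi26, hfull, Nat.testBit_two_pow_sub_one]
    simp [hi26]
  · rw [if_neg hfull]
    obtain ⟨hkz, hklow⟩ := leastZero_testBit mask
    set k : Nat := leastZero mask with hk
    have hk26 : k < 26 := by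
      by_contra hge
      apply hfull
      apply Nat.eq_of_testBit_eq
      intro j
      rw [Nat.testBit_two_pow_sub_one]
      by_cases hj : j < 26
      · rw [hklow j (by omega)]; simp [hj]
      · rw [hhigh j (by omega)]; simp [hj]
    have hxor : mask ^^^ (mask + 1) = 2 ^ (k + 1) - 1 := xor_succ_eq mask
    have hbl : bitLength (mask ^^^ (mask + 1)) = k + 1 := by
      rw [hxor, bitLength]
      have hp : 0 < 2 ^ k := pow_pos (by omega : (0:Nat) < 2) _
      have hp2 : 2 ^ (k + 1) = 2 * 2 ^ k := by rw [Nat.pow_succ]; ring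
      rw [if_neg (by omega), log2_two_pow_sub_one]
    rw [hbl, alphabet_eq]
    have harg : 97 + (k + 1) - 1 = 97 + k := by omega
    rw [show Char.ofNat (97 + (k + 1) - 1) = chOf k from by rw [harg]; rfl]
    apply loopA_range' 26 0 k hm
    · intro j hj
      rw [hcont j (by omega)]
      exact hklow j hj
    · rw [hcont k hk26]
      exact hkz
    · omega
    · omega
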